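-- pv_equiv track=rewrite | github.com/warwar-official/TinyGPT | utility/dialog_processor.py | _sort_dialogues
-- ===== SOURCE A (Python) =====
-- def _sort_dialogues(dialogues: list[list[str]], keywords: set) -> tuple[list[list[str]], list[list[str]]]:
--     clear_dialogues = []
--     marked_dialogues = []
--     for dialogue in dialogues:
--         is_marked = False
--         for line in dialogue:
--             is_marked = any(word in line for word in keywords)
--             if is_marked:
--                 break
--         if is_marked:
--             marked_dialogues.append(dialogue)
--         else:
--             clear_dialogues.append(dialogue)
--     return clear_dialogues, marked_dialogues
-- ===== SOURCE B (Python) =====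
-- def _sort_dialogues(dialogues: list[list[str]], keywords: set) -> tuple[list[list[str]], list[list[str]]]:
--     # Join each dialogue's lines with a NUL separator (which printable text never
--     # contains) and scan each keyword once over the joined text instead of once per
--     # line; then split the flagged dialogues into the two output lists by filtering.
--     def has_keyword(dialogue):
--         if not dialogue:
--             return False  # an empty dialogue has no text
--         text = "\x00".join(dialogue)
--         return any(word in text for word in keywords)
--     flagged = [(dialogue, has_keyword(dialogue)) for dialogue in dialogues]
--     clear_dialogues = [d for d, hit in flagged if not hit]
--     marked_dialogues = [d for d, hit in flagged if hit]
--     return clear_dialogues, marked_dialogues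
-- ===== Notes on version B (the rewrite author's own statement) =====
-- stated objective: faster
-- what changed: B joins each dialogue's lines with a NUL separator and runs each keyword substring search once over the whole joined text (then builds the two outputs by filtering flagged pairs), instead of A's per-line inner loop of any() substring checks with a break.
import Mathlib
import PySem

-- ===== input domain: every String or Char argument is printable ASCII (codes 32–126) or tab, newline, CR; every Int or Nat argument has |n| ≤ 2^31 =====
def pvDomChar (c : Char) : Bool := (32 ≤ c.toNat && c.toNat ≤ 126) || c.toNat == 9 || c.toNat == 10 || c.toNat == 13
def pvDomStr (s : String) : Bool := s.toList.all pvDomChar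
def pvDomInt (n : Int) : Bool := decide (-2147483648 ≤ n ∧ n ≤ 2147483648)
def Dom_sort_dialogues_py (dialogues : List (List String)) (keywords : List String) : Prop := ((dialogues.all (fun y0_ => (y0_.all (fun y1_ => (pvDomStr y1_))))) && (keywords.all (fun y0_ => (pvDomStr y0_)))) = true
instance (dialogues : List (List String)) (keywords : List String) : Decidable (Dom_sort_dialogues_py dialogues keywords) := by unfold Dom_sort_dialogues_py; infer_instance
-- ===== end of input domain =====

-- ===== PORT A =====
-- B replaces A's per-line any() keyword loop by one substring scan per keyword over the
-- dialogue's lines joined with a NUL separator, and builds the outputs by filtering (alternative).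
-- Inner 'for line in dialogue: is_marked = any(...); if is_marked: break' loop of A.
def pvAInner (keywords : List String) : List String → Bool → Bool
  | [], is_marked => is_marked
  | line :: rest, _ =>
    let is_marked := keywords.any (fun word => PySem.Str.isIn word line)
    if is_marked then is_marked else pvAInner keywords rest is_marked

def sort_dialogues_py (dialogues : List (List String)) (keywords : List String) : List (List String) × List (List String) :=
  dialogues.foldl
    (fun acc dialogue =>
      let is_marked := pvAInner keywords dialogue false
      if is_marked then (acc.1, acc.2 ++ [dialogue]) else (acc.1 ++ [dialogue], acc.2))
    ([], [])

-- ===== PORT B =====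
-- has_keyword of Source B: join the lines with NUL, scan each keyword once over the joined text.
def pvHasKeyword (keywords : List String) (dialogue : List String) : Bool :=
  if dialogue.isEmpty then false
  else
    let text := PySem.Str.join "\x00" dialogue
    keywords.any (fun word => PySem.Str.isIn word text)

def sort_dialogues_py_alt (dialogues : List (List String)) (keywords : List String) : List (List String) × List (List String) :=
  let flagged := dialogues.map (fun d => (d, pvHasKeyword keywords d))
  ((flagged.filter (fun p => !p.2)).map Prod.fst,
   (flagged.filter (fun p => p.2)).map Prod.fst)

-- ===== PRECONDITION & SPEC =====
def Spec_sort_dialogues_py (dialogues : List (List String)) (keywords : List String) (out : List (List String) × List (List String)) : Prop := out = sort_dialogues_py_alt dialogues keywords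
instance (dialogues : List (List String)) (keywords : List String) (out : List (List String) × List (List String)) : Decidable (Spec_sort_dialogues_py dialogues keywords out) := by unfold Spec_sort_dialogues_py; infer_instance

-- ===== CLAIM (what is proved, stated in full; the proofs are below) =====
def Claim_equal_sort_dialogues_py : Prop := ∀ (dialogues : List (List String)) (keywords : List String), Dom_sort_dialogues_py dialogues keywords → Spec_sort_dialogues_py dialogues keywords (sort_dialogues_py dialogues keywords)

-- ===== LEMMAS AND PROOFS =====

theorem infix_iff_drop {α : Type} {k x : List α} : k <:+: x ↔ ∃ n, k <+: x.drop n := by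
  constructor
  · rintro ⟨s, t, rfl⟩
    exact ⟨s.length, by simp [List.drop_left', List.prefix_append]⟩
  · rintro ⟨n, h⟩
    exact h.isInfix.trans (List.drop_suffix n x).isInfix

-- a prefix of a ++ sep :: b that avoids sep is a prefix of a
theorem prefix_sep {α : Type} {sep : α} {k a b : List α} (hk : sep ∉ k) :
    k <+: (a ++ sep :: b) → k <+: a := by
  induction a generalizing k with
  | nil =>
    intro h
    cases k with
    | nil => exact List.nil_prefix
    | cons c k' =>
      obtain ⟨t, ht⟩ := h
      simp at ht
      exact absurd (ht.1 ▸ List.mem_cons_self) hk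
  | cons d0 a' ih =>
    intro h
    cases k with
    | nil => exact List.nil_prefix
    | cons c k' =>
      obtain ⟨t, ht⟩ := h
      simp at ht
      obtain ⟨rfl, ht⟩ := ht
      have := ih (k := k') (fun hm => hk (List.mem_cons_of_mem _ hm)) ⟨t, ht⟩
      exact (List.prefix_cons_inj _).mpr this

-- an occurrence of a sep-free word cannot straddle the separator
theorem sep_infix_split {α : Type} {sep : α} {k a b : List α} (hk : sep ∉ k) :
    k <:+: (a ++ sep :: b) ↔ k <:+: a ∨ k <:+: b := by
  constructor
  · intro h
    obtain ⟨n, hp⟩ := infix_iff_drop.mp h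
    rcases le_or_gt n a.length with hn | hn
    · left
      rw [List.drop_append, Nat.sub_eq_zero_of_le hn, List.drop_zero] at hp
      exact (prefix_sep hk hp).isInfix.trans (List.drop_suffix n a).isInfix
    · right
      rw [List.drop_append, List.drop_of_length_le (le_of_lt hn)] at hp
      have h1 : (sep :: b).drop (n - a.length) = b.drop (n - a.length - 1) := by
        have : n - a.length = (n - a.length - 1) + 1 := by omega
        rw [this]; rfl
      rw [List.nil_append, h1] at hp
      exact hp.isInfix.trans (List.drop_suffix _ b).isInfix
  · rintro (h | h)
    · exact h.trans ⟨[], sep :: b, rfl⟩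
    · exact h.trans ⟨a ++ [sep], [], by simp⟩

-- a sep-free word occurs in the sep-join iff it occurs in one of the parts
theorem infix_join {sep : Char} (k : List Char) (ls : List (List Char))
    (hk : sep ∉ k) (hne : ls ≠ []) :
    k <:+: PySem.Chars.join [sep] ls ↔ ∃ l ∈ ls, k <:+: l := by
  induction ls with
  | nil => exact absurd rfl hne
  | cons p rest ih =>
    cases rest with
    | nil => simp [PySem.Chars.join_singleton]
    | cons q rest' =>
      rw [PySem.Chars.join_cons_cons]
      have : p ++ [sep] ++ PySem.Chars.join [sep] (q :: rest')
           = p ++ sep :: PySem.Chars.join [sep] (q :: rest') := by simp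
      rw [this, sep_infix_split hk, ih (by simp)]
      simp

theorem aInner_eq (keywords : List String) (d : List String) :
    pvAInner keywords d false = d.any (fun line => keywords.any (fun w => PySem.Str.isIn w line)) := by
  induction d with
  | nil => rfl
  | cons l rest ih =>
    rw [List.any_cons, ← ih]
    show (if keywords.any (fun w => PySem.Str.isIn w l) then keywords.any (fun w => PySem.Str.isIn w l)
          else pvAInner keywords rest (keywords.any (fun w => PySem.Str.isIn w l))) = _
    cases h : keywords.any (fun w => PySem.Str.isIn w l) <;> simp_all

theorem hasKeyword_eq (keywords : List String) (d : List String)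
    (hd : ∀ l ∈ d, '\x00' ∉ l.toList) (hkw : ∀ w ∈ keywords, '\x00' ∉ w.toList) :
    pvHasKeyword keywords d = d.any (fun line => keywords.any (fun w => PySem.Str.isIn w line)) := by
  cases d with
  | nil => rfl
  | cons p rest =>
    rw [pvHasKeyword]
    simp only [List.isEmpty_cons, if_neg Bool.false_ne_true]
    rw [Bool.eq_iff_iff]
    simp only [List.any_eq_true, PySem.Str.isIn_iff_infix]
    have hj : (PySem.Str.join "\x00" (p :: rest)).toList
           = PySem.Chars.join ['\x00'] ((p :: rest).map String.toList) := by
      simp [PySem.Str.join]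
    constructor
    · rintro ⟨w, hw, hinf⟩
      rw [hj] at hinf
      obtain ⟨l, hl, hi⟩ := (infix_join _ _ (hkw w hw) (by simp)).mp hinf
      obtain ⟨l', hl', rfl⟩ := List.mem_map.mp hl
      exact ⟨l', hl', w, hw, hi⟩
    · rintro ⟨l, hl, w, hw, hinf⟩
      refine ⟨w, hw, ?_⟩
      rw [hj]
      exact (infix_join _ _ (hkw w hw) (by simp)).mpr ⟨l.toList, List.mem_map_of_mem hl, hinf⟩

-- A's accumulator loop is the pair of filters
theorem foldl_partition (f : List String → Bool) (ds : List (List String))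
    (c m : List (List String)) :
    ds.foldl (fun acc d => if f d then (acc.1, acc.2 ++ [d]) else (acc.1 ++ [d], acc.2)) (c, m)
      = (c ++ ds.filter (fun d => !f d), m ++ ds.filter f) := by
  induction ds generalizing c m with
  | nil => simp
  | cons d rest ih =>
    cases h : f d <;> simp [List.foldl_cons, h, ih]

theorem map_filter_snd (g : List String → Bool) (ds : List (List String)) :
    ((ds.map (fun d => (d, g d))).filter (fun p => p.2)).map Prod.fst = ds.filter g := by
  induction ds with
  | nil => rfl
  | cons d rest ih => cases h : g d <;> simp [h, ih]

theorem map_filter_not_snd (g : List String → Bool) (ds : List (List String)) :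
    ((ds.map (fun d => (d, g d))).filter (fun p => !p.2)).map Prod.fst = ds.filter (fun d => !g d) := by
  induction ds with
  | nil => rfl
  | cons d rest ih => cases h : g d <;> simp [h, ih]

theorem no_nul_of_dom {s : String} (h : pvDomStr s = true) : '\x00' ∉ s.toList := by
  intro hm
  have := List.all_eq_true.mp h _ hm
  simp [pvDomChar] at this

-- ===== VERDICT (by name: the statement is the Claim_ definition above) =====
theorem sort_dialogues_py_spec : Claim_equal_sort_dialogues_py := by
  intro dialogues keywords hdom
  show sort_dialogues_py dialogues keywords = sort_dialogues_py_alt dialogues keywords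
  obtain ⟨hd, hk⟩ := Bool.and_eq_true_iff.mp hdom
  have hkw : ∀ w ∈ keywords, '\x00' ∉ w.toList :=
    fun w hw => no_nul_of_dom (List.all_eq_true.mp hk w hw)
  have hflag : ∀ d ∈ dialogues, pvHasKeyword keywords d = pvAInner keywords d false := by
    intro d hdm
    rw [aInner_eq, hasKeyword_eq keywords d
      (fun l hl => no_nul_of_dom (List.all_eq_true.mp (List.all_eq_true.mp hd d hdm) l hl)) hkw]
  show dialogues.foldl
      (fun acc dialogue =>
        let is_marked := pvAInner keywords dialogue false
        if is_marked then (acc.1, acc.2 ++ [dialogue]) else (acc.1 ++ [dialogue], acc.2))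
      ([], []) = _
  rw [foldl_partition (fun d => pvAInner keywords d false)]
  show _ = (((dialogues.map (fun d => (d, pvHasKeyword keywords d))).filter (fun p => !p.2)).map Prod.fst,
            ((dialogues.map (fun d => (d, pvHasKeyword keywords d))).filter (fun p => p.2)).map Prod.fst)
  rw [map_filter_not_snd, map_filter_snd]
  have h1 : List.filter (fun d => !pvHasKeyword keywords d) dialogues
      = List.filter (fun d => !pvAInner keywords d false) dialogues :=
    List.filter_congr (fun d hdm => by rw [hflag d hdm])
  have h2 : List.filter (fun d => pvHasKeyword keywords d) dialogues
      = List.filter (fun d => pvAInner keywords d false) dialogues :=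
    List.filter_congr (fun d hdm => by rw [hflag d hdm])
  rw [h1, h2]
  simp
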